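-- pv_equiv track=rewrite | github.com/mombasawalafaizan/dsa_solution | Dynamic Programming/pairs_with_specific_difference.py | pairsWithDifference
-- ===== SOURCE A (Python) =====
-- def pairsWithDifference(arr, N, K):
--     arr.sort()
--     max_sum = arr[0]
--     dp = [0] * N
--     for i in range(1, N):
--         max_sum += arr[i]
--         if arr[i] < (arr[i-1]+K):
--             dp[i] = dp[i-1]
--         else:
--             if (i-dp[i-1])%2!=0:
--                 max_sum -= arr[dp[i-1]]
--             dp[i] = i
--     if (N-dp[N-1])%2!=0:
--         max_sum -= arr[dp[N-1]]
--     return max_sum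
-- ===== SOURCE B (Python) =====
-- def pairsWithDifference(arr, N, K):
--     # Backward greedy pairing: sort in place (same mutation as the original), then walk the
--     # first N slots from the top, pairing adjacent elements whose gap is below K and summing
--     # each pair; unpaired elements contribute nothing. No prefix sum, no run bookkeeping.
--     arr.sort()
--     total = 0
--     i = N - 1
--     while i >= 0:
--         if i >= 1 and arr[i] < arr[i - 1] + K:
--             total += arr[i] + arr[i - 1]
--             i -= 2
--         else:
--             i -= 1
--     return total
-- ===== Notes on version B (the rewrite author's own statement) =====
-- stated objective: alternative
-- what changed: B discards A's sum-everything-then-subtract-chain-minima dp entirely: it walks the sorted prefix backward from index N-1, greedily pairing adjacent elements whose gap is below K and adding each pair's two values to the total, skipping unpaired elements; no prefix sum, no dp table, no subtraction.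
import Mathlib
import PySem

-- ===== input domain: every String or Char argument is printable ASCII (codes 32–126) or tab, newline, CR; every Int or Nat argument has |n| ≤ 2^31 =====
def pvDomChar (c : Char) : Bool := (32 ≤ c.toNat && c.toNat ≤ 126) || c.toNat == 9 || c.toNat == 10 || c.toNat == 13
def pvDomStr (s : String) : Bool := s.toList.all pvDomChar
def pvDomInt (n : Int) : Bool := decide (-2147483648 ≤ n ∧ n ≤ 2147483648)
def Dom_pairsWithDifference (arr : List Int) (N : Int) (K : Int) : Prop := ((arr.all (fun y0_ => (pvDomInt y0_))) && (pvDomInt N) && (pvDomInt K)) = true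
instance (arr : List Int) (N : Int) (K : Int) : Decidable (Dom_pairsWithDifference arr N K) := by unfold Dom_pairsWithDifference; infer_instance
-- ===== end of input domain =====

-- B replaces A's dp of chain starts (sum everything, subtract odd-chain minima) with a backward
-- greedy walk that pairs adjacent elements with gap < K and sums only the pairs. Both A and B
-- sort arr in place in Python; the equivalence proved here is about the return value only.

-- shared indexing primitive: Python's arr[i] (always in range under Pre_; default never used there)
def pwdG (a : List Int) (t : Int) : Int := (PySem.List.pyGet? a t).getD 0

-- ===== PORT A =====
-- loop body of A's 'for i in range(1, N)': state (max_sum, dp)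
def pwdStep (a : List Int) (K : Int) (st : Int × List Int) (i : Int) : Int × List Int :=
  if pwdG a i < pwdG a (i - 1) + K then
    (st.1 + pwdG a i, st.2.set i.toNat (pwdG st.2 (i - 1)))
  else
    ((if PySem.Int.mod (i - pwdG st.2 (i - 1)) 2 ≠ 0 then
        st.1 + pwdG a i - pwdG a (pwdG st.2 (i - 1)) else st.1 + pwdG a i),
      st.2.set i.toNat i)

-- A's final fixup after the loop
def pwdFinish (a : List Int) (N : Int) (st : Int × List Int) : Int :=
  if PySem.Int.mod (N - pwdG st.2 (N - 1)) 2 ≠ 0 then st.1 - pwdG a (pwdG st.2 (N - 1)) else st.1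

def pairsWithDifference (arr : List Int) (N : Int) (K : Int) : Int :=
  let a := PySem.List.sorted arr (fun x => x) false
  pwdFinish a N
    ((PySem.List.pyRange 1 N 1).foldl (pwdStep a K) (pwdG a 0, List.replicate N.toNat 0))

-- ===== PORT B =====
-- Source B's backward while loop: i descends from N-1; pair (i-1, i) when arr[i] < arr[i-1]+K
def pwdPairT (a : List Int) (K : Int) (i t : Int) : Int :=
  if h : 0 ≤ i then
    if 1 ≤ i ∧ pwdG a i < pwdG a (i - 1) + K then
      pwdPairT a K (i - 2) (t + pwdG a i + pwdG a (i - 1))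
    else pwdPairT a K (i - 1) t
  else t
termination_by (i + 1).toNat
decreasing_by all_goals omega

def pairsWithDifference_alt (arr : List Int) (N : Int) (K : Int) : Int :=
  let a := PySem.List.sorted arr (fun x => x) false
  pwdPairT a K (N - 1) 0

-- ===== PRECONDITION & SPEC =====
-- exactly where Python A returns normally: it raises IndexError unless 1 ≤ N ≤ len(arr)
def Pre_pairsWithDifference (arr : List Int) (N : Int) (K : Int) : Prop :=
  1 ≤ N ∧ N ≤ arr.length
instance (arr : List Int) (N : Int) (K : Int) : Decidable (Pre_pairsWithDifference arr N K) := by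
  unfold Pre_pairsWithDifference; infer_instance
def pvWitness_pairsWithDifference : List Int × Int × Int := ([3, 5, 10, 15, 17, 12, 9], 7, 4)

def Spec_pairsWithDifference (arr : List Int) (N : Int) (K : Int) (out : Int) : Prop := out = pairsWithDifference_alt arr N K
instance (arr : List Int) (N : Int) (K : Int) (out : Int) : Decidable (Spec_pairsWithDifference arr N K out) := by unfold Spec_pairsWithDifference; infer_instance

-- ===== CLAIM (what is proved, stated in full; the proofs are below) =====
def Claim_equal_pairsWithDifference : Prop := ∀ (arr : List Int) (N : Int) (K : Int), Dom_pairsWithDifference arr N K → Pre_pairsWithDifference arr N K → Spec_pairsWithDifference arr N K (pairsWithDifference arr N K)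

-- ===== LEMMAS AND PROOFS =====

-- PySem.Int.mod with modulus 2 is Lean's emod (divisor positive)
theorem pwdMod2 (x : Int) : PySem.Int.mod x 2 = x % 2 :=
  PySem.Int.mod_eq_emod_of_pos (by norm_num)

theorem pwd_mod_ne_iff (x : Int) : PySem.Int.mod x 2 ≠ 0 ↔ PySem.Int.mod x 2 = 1 := by
  rw [pwdMod2]; omega

-- sum of a[t] over indices i ≤ t < N
def pwdSumFrom (a : List Int) (N i : Int) : Int := ((PySem.List.pyRange i N 1).map (pwdG a)).sum

theorem pwdSumFrom_nil (a : List Int) (N i : Int) (h : N ≤ i) : pwdSumFrom a N i = 0 := by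
  unfold pwdSumFrom
  rw [PySem.List.pyRange_one]
  simp [Int.toNat_of_nonpos (by omega : N - i ≤ 0)]

theorem pwdSumFrom_cons (a : List Int) (N i : Int) (h : i < N) :
    pwdSumFrom a N i = pwdG a i + pwdSumFrom a N (i + 1) := by
  unfold pwdSumFrom
  rw [PySem.List.pyRange_one_cons h]
  simp

theorem pwdSumFrom_split (a : List Int) (N m i : Int) (h1 : i ≤ m) (h2 : m ≤ N) :
    pwdSumFrom a N i = pwdSumFrom a m i + pwdSumFrom a N m := by
  unfold pwdSumFrom
  rw [PySem.List.pyRange_one_append i m N h1 h2, List.map_append, List.sum_append]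

theorem pwdRange_nil (N i : Int) (h : N ≤ i) : PySem.List.pyRange i N 1 = [] := by
  rw [PySem.List.pyRange_one]
  simp [Int.toNat_of_nonpos (by omega : N - i ≤ 0)]

-- ---- A-side machinery (from the dp fold to a forward run walk) ----

def pwdAdv (a : List Int) (K N j : Int) : Int :=
  if h : j + 1 < N ∧ pwdG a (j + 1) < pwdG a j + K then
    pwdAdv a K N (j + 1)
  else j
termination_by (N - j).toNat
decreasing_by omega

theorem pwdAdv_ge (a : List Int) (K N j : Int) : j ≤ pwdAdv a K N j := by
  fun_induction pwdAdv a K N j with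
  | case1 j h ih => omega
  | case2 j h => omega

def pwdLoop (a : List Int) (K N i t : Int) : Int :=
  if h : i < N then
    pwdLoop a K N (pwdAdv a K N i + 1)
      (if PySem.Int.mod (pwdAdv a K N i - i + 1) 2 = 1 then t - pwdG a i else t)
  else t
termination_by (N - i).toNat
decreasing_by have := pwdAdv_ge a K N i; omega

theorem pwdAdv_step (a : List Int) (K N j : Int)
    (h : j + 1 < N ∧ pwdG a (j + 1) < pwdG a j + K) :
    pwdAdv a K N j = pwdAdv a K N (j + 1) := by
  rw [pwdAdv, dif_pos h]

theorem pwdAdv_stop (a : List Int) (K N j : Int)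
    (h : ¬(j + 1 < N ∧ pwdG a (j + 1) < pwdG a j + K)) :
    pwdAdv a K N j = j := by
  rw [pwdAdv, dif_neg h]

-- full specification of pwdAdv: run end, run property, stop condition
theorem pwdAdv_spec (a : List Int) (K N j0 : Int) (h : j0 < N) :
    pwdAdv a K N j0 < N ∧
    (∀ t : Int, j0 < t → t ≤ pwdAdv a K N j0 → pwdG a t < pwdG a (t - 1) + K) ∧
    ¬(pwdAdv a K N j0 + 1 < N ∧ pwdG a (pwdAdv a K N j0 + 1) < pwdG a (pwdAdv a K N j0) + K) := by
  fun_induction pwdAdv a K N j0 with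
  | case1 j hc ih =>
    obtain ⟨h1, h2, h3⟩ := ih hc.1
    refine ⟨h1, ?_, h3⟩
    intro t ht1 ht2
    by_cases htj : t = j + 1
    · subst htj
      simpa using hc.2
    · exact h2 t (by omega) ht2
  | case2 j hc =>
    exact ⟨h, by intro t ht1 ht2; omega, hc⟩

theorem pwdG_set_self (dp : List Int) (i v : Int) (h0 : 0 ≤ i) (h : i.toNat < dp.length) :
    pwdG (dp.set i.toNat v) i = v := by
  rw [pwdG, PySem.List.pyGet?_of_nonneg _ h0, List.getElem?_set_self (by simpa using h)]
  rfl

theorem pwdG_eq (a : List Int) (i : Int) (h0 : 0 ≤ i) (h1 : i.toNat < a.length) :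
    pwdG a i = a[i.toNat] := by
  rw [pwdG, PySem.List.pyGet?_of_nonneg a h0, List.getElem?_eq_getElem h1]
  rfl

-- sum(a[:N]) agrees with the index sum pwdSumFrom
theorem pwd_sum_take (a : List Int) (N : Int) (hN : N ≤ a.length) :
    ∀ (fuel : Nat) (i : Int), (N - i).toNat ≤ fuel → 0 ≤ i → i ≤ N →
      ((a.take N.toNat).drop i.toNat).sum = pwdSumFrom a N i := by
  intro fuel
  induction fuel with
  | zero =>
    intro i hf h0 hN'
    have hi : i = N := by omega
    subst hi
    rw [List.drop_eq_nil_of_le (by simp only [List.length_take]; omega),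
      pwdSumFrom_nil _ _ _ le_rfl]
    rfl
  | succ fuel ih =>
    intro i hf h0 hN'
    by_cases hiN : i < N
    · have hlt : i.toNat < (a.take N.toNat).length := by simp only [List.length_take]; omega
      rw [← List.getElem_cons_drop hlt, pwdSumFrom_cons a N i hiN, List.sum_cons]
      have hdrop : List.drop (i.toNat + 1) (a.take N.toNat)
          = List.drop (i + 1).toNat (a.take N.toNat) := by congr 1; omega
      rw [List.getElem_take, hdrop, ih (i + 1) (by omega) (by omega) (by omega),
        pwdG_eq a i h0 (by omega)]
    · have hi : i = N := by omega
      subst hi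
      rw [List.drop_eq_nil_of_le (by simp only [List.length_take]; omega),
        pwdSumFrom_nil _ _ _ le_rfl]
      rfl

-- main invariant for A: the dp fold followed by the final fixup equals the run walk pwdLoop
theorem pwd_main (a : List Int) (K N : Int) :
    ∀ (fuel : Nat) (i d ms : Int) (dp : List Int),
      (N - i).toNat ≤ fuel → 1 ≤ i → i ≤ N → 0 ≤ d → d < i →
      dp.length = N.toNat →
      pwdG dp (i - 1) = d →
      (∀ t : Int, d < t → t < i → pwdG a t < pwdG a (t - 1) + K) →
      pwdFinish a N ((PySem.List.pyRange i N 1).foldl (pwdStep a K) (ms, dp))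
        = pwdLoop a K N (pwdAdv a K N (i - 1) + 1)
            (ms + pwdSumFrom a N i -
              (if PySem.Int.mod (pwdAdv a K N (i - 1) - d + 1) 2 = 1 then pwdG a d else 0)) := by
  have base : ∀ (d ms : Int) (dp : List Int), 0 ≤ d → d < N → pwdG dp (N - 1) = d →
      pwdFinish a N ((PySem.List.pyRange N N 1).foldl (pwdStep a K) (ms, dp))
        = pwdLoop a K N (pwdAdv a K N (N - 1) + 1)
            (ms + pwdSumFrom a N N -
              (if PySem.Int.mod (pwdAdv a K N (N - 1) - d + 1) 2 = 1 then pwdG a d else 0)) := by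
    intro d ms dp h0d hdN hdp
    have hstop : pwdAdv a K N (N - 1) = N - 1 :=
      pwdAdv_stop a K N (N - 1) (by rintro ⟨h1, _⟩; omega)
    rw [pwdRange_nil N N le_rfl, List.foldl_nil, hstop, pwdLoop,
      dif_neg (by omega : ¬ N - 1 + 1 < N), pwdSumFrom_nil a N N le_rfl, pwdFinish, hdp]
    have he : N - 1 - d + 1 = N - d := by ring
    rw [he]
    simp only [pwd_mod_ne_iff]
    split_ifs with hmod
    · ring
    · ring
  intro fuel
  induction fuel with
  | zero =>
    intro i d ms dp hf h1 hiN h0d hdi hlen hdp hrun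
    have hi : i = N := by omega
    subst hi
    exact base d ms dp h0d hdi hdp
  | succ fuel ih =>
    intro i d ms dp hf h1 hiN h0d hdi hlen hdp hrun
    by_cases hiN' : i < N
    · have h0i : 0 ≤ i := by omega
      have hit : i.toNat < dp.length := by rw [hlen]; omega
      have he1 : i - 1 + 1 = i := by ring
      have he2 : i + 1 - 1 = i := by ring
      rw [PySem.List.pyRange_one_cons hiN', List.foldl_cons, pwdStep, hdp]
      by_cases hc : pwdG a i < pwdG a (i - 1) + K
      · rw [if_pos hc]
        have hrec := ih (i + 1) d (ms + pwdG a i) (dp.set i.toNat d) (by omega) (by omega)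
          (by omega) h0d (by omega) (by simpa using hlen)
          (by rw [he2]; exact pwdG_set_self dp i d h0i hit)
          (by
            intro t ht1 ht2
            by_cases hti : t = i
            · subst hti; exact hc
            · exact hrun t ht1 (by omega))
        rw [he2] at hrec
        rw [hrec]
        have hadv : pwdAdv a K N (i - 1) = pwdAdv a K N i := by
          have := pwdAdv_step a K N (i - 1) (by rw [he1]; exact ⟨by omega, hc⟩)
          rwa [he1] at this
        rw [hadv, pwdSumFrom_cons a N i hiN']
        congr 1
        ring
      · rw [if_neg hc]
        have hrec := ih (i + 1) i
          (if PySem.Int.mod (i - d) 2 ≠ 0 then ms + pwdG a i - pwdG a d else ms + pwdG a i)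
          (dp.set i.toNat i) (by omega) (by omega) (by omega) h0i (by omega)
          (by simpa using hlen)
          (by rw [he2]; exact pwdG_set_self dp i i h0i hit)
          (by intro t ht1 ht2; omega)
        rw [he2] at hrec
        rw [hrec]
        have hstop : pwdAdv a K N (i - 1) = i - 1 := by
          refine pwdAdv_stop a K N (i - 1) ?_
          rintro ⟨-, hcc⟩
          rw [he1] at hcc
          exact hc hcc
        rw [hstop, he1, pwdSumFrom_cons a N i hiN']
        conv_rhs => rw [pwdLoop]
        rw [dif_pos hiN']
        congr 1
        have he3 : i - 1 - d + 1 = i - d := by ring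
        rw [he3]
        simp only [pwd_mod_ne_iff]
        split_ifs
        all_goals ring
    · have hi : i = N := by omega
      subst hi
      exact base d ms dp h0d hdi hdp

theorem pwd_sum_slice (a : List Int) (N : Int) (h1 : 1 ≤ N) (hlen : N ≤ a.length) :
    (PySem.List.slice a none (some N)).sum = pwdG a 0 + pwdSumFrom a N 1 := by
  rw [PySem.List.slice_to a (by omega : (0:Int) ≤ N)]
  have := pwd_sum_take a N hlen (N - 0).toNat 0 le_rfl le_rfl (by omega)
  simp only [Int.toNat_zero, List.drop_zero] at this
  rw [this, pwdSumFrom_cons a N 0 (by omega)]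
  norm_num

-- A's whole computation equals the run walk started at 0 on the prefix sum
theorem pwd_top (a : List Int) (K N : Int) (h1 : 1 ≤ N) (hlen : N ≤ a.length) :
    pwdFinish a N
        ((PySem.List.pyRange 1 N 1).foldl (pwdStep a K) (pwdG a 0, List.replicate N.toNat 0))
      = pwdLoop a K N 0 (PySem.List.slice a none (some N)).sum := by
  have he0 : (1 : Int) - 1 = 0 := by ring
  have hdp0 : pwdG (List.replicate N.toNat (0 : Int)) (1 - 1) = 0 := by
    rw [he0]
    simp only [pwdG, PySem.List.pyGet?_zero, List.getElem?_replicate]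
    split <;> rfl
  have key := pwd_main a K N (N - 1).toNat 1 0 (pwdG a 0) (List.replicate N.toNat 0)
    le_rfl le_rfl h1 le_rfl (by omega) (by simp) hdp0
    (fun t ht1 ht2 => absurd ht2 (by omega))
  rw [key, he0, pwd_sum_slice a N h1 hlen]
  conv_rhs => rw [pwdLoop]
  rw [dif_pos (by omega : (0:Int) < N)]
  congr 1
  split_ifs <;> ring

-- ---- B-side machinery (from the backward pairing to the same run walk) ----

-- accumulator-free form of pwdPairT
def pwdF (a : List Int) (K i : Int) : Int :=
  if h : 0 ≤ i then
    if 1 ≤ i ∧ pwdG a i < pwdG a (i - 1) + K then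
      pwdG a i + pwdG a (i - 1) + pwdF a K (i - 2)
    else pwdF a K (i - 1)
  else 0
termination_by (i + 1).toNat
decreasing_by all_goals omega

theorem pwdF_neg (a : List Int) (K i : Int) (h : i < 0) : pwdF a K i = 0 := by
  rw [pwdF, dif_neg (by omega)]

theorem pwdPairT_eq (a : List Int) (K : Int) :
    ∀ i t, pwdPairT a K i t = t + pwdF a K i := by
  intro i
  fun_induction pwdF a K i with
  | case1 i h0 hc ih =>
    intro t
    rw [pwdPairT, dif_pos h0, if_pos hc, ih]
    ring
  | case2 i h0 hc ih =>
    intro t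
    rw [pwdPairT, dif_pos h0, if_neg hc, ih]
  | case3 i h0 =>
    intro t
    rw [pwdPairT, dif_neg h0]
    ring

-- run lemma: over a maximal run s..e, backward pairing yields the run's sum minus its minimum
-- when the run length is odd, plus the value below the run
theorem pwdF_run (a : List Int) (K : Int) :
    ∀ (fuel : Nat) (s e : Int), (e - s).toNat ≤ fuel → 0 ≤ s → s ≤ e →
      (s = 0 ∨ ¬(pwdG a s < pwdG a (s - 1) + K)) →
      (∀ t : Int, s < t → t ≤ e → pwdG a t < pwdG a (t - 1) + K) →
      pwdF a K e = pwdSumFrom a (e + 1) s -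
        (if PySem.Int.mod (e - s + 1) 2 = 1 then pwdG a s else 0) + pwdF a K (s - 1) := by
  intro fuel
  induction fuel with
  | zero =>
    intro s e hf h0 hse hstart hrun
    have he : e = s := by omega
    subst he
    have hmod : PySem.Int.mod (e - e + 1) 2 = 1 := by rw [pwdMod2]; omega
    rw [if_pos hmod, pwdSumFrom_cons a (e + 1) e (by omega),
      pwdSumFrom_nil a (e + 1) (e + 1) le_rfl]
    have hc : ¬(1 ≤ e ∧ pwdG a e < pwdG a (e - 1) + K) := by
      rcases hstart with h | h
      · omega
      · exact fun hh => h hh.2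
    rw [pwdF, dif_pos h0, if_neg hc]
    ring
  | succ fuel ih =>
    intro s e hf h0 hse hstart hrun
    by_cases hes : e = s
    · subst hes
      exact ih _ _ (by omega) h0 le_rfl hstart hrun
    · have hse1 : s + 1 ≤ e := by omega
      have hc : 1 ≤ e ∧ pwdG a e < pwdG a (e - 1) + K :=
        ⟨by omega, hrun e (by omega) le_rfl⟩
      rw [pwdF, dif_pos (by omega : (0:Int) ≤ e), if_pos hc]
      have hsum : pwdSumFrom a (e + 1) s
          = pwdSumFrom a (e - 1) s + (pwdG a (e - 1) + pwdG a e) := by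
        rw [pwdSumFrom_split a (e + 1) (e - 1) s (by omega) (by omega),
          pwdSumFrom_cons a (e + 1) (e - 1) (by omega)]
        have h1 : e - 1 + 1 = e := by ring
        rw [h1, pwdSumFrom_cons a (e + 1) e (by omega),
          pwdSumFrom_nil a (e + 1) (e + 1) le_rfl]
        ring
      by_cases he2 : s ≤ e - 2
      · have hrec := ih s (e - 2) (by omega) h0 he2 hstart
          (fun t ht1 ht2 => hrun t ht1 (by omega))
        have h1 : e - 2 + 1 = e - 1 := by ring
        rw [h1] at hrec
        rw [hrec, hsum]
        have hmq : (if PySem.Int.mod (e - 2 - s + 1) 2 = 1 then pwdG a s else 0)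
            = (if PySem.Int.mod (e - s + 1) 2 = 1 then pwdG a s else 0) := by
          simp only [pwdMod2]
          split_ifs <;> first | rfl | omega
        rw [hmq]
        ring
      · have hes1 : e = s + 1 := by omega
        subst hes1
        have h1 : s + 1 - 2 = s - 1 := by ring
        rw [h1, hsum, pwdSumFrom_nil a (s + 1 - 1) s (by omega)]
        have hmod : ¬ PySem.Int.mod (s + 1 - s + 1) 2 = 1 := by rw [pwdMod2]; omega
        rw [if_neg hmod]
        have h2 : s + 1 - 1 = s := by ring
        rw [h2]
        ring

-- the run walk equals the backward pairing: started at a run boundary i with the running total t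
theorem pwd_loopF (a : List Int) (K N : Int) :
    ∀ (fuel : Nat) (i t : Int), (N - i).toNat ≤ fuel → 0 ≤ i → i ≤ N →
      (i = N ∨ i = 0 ∨ ¬(pwdG a i < pwdG a (i - 1) + K)) →
      pwdLoop a K N i t = t - pwdSumFrom a N i + (pwdF a K (N - 1) - pwdF a K (i - 1)) := by
  intro fuel
  induction fuel with
  | zero =>
    intro i t hf h0 hN hb
    have hi : i = N := by omega
    subst hi
    rw [pwdLoop, dif_neg (lt_irrefl _), pwdSumFrom_nil a _ _ le_rfl]
    ring
  | succ fuel ih =>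
    intro i t hf h0 hN hb
    by_cases hiN : i < N
    · obtain ⟨hj1, hj2, hj3⟩ := pwdAdv_spec a K N i hiN
      have hji := pwdAdv_ge a K N i
      set j := pwdAdv a K N i with hj
      have hbound : j + 1 = N ∨ j + 1 = 0 ∨ ¬(pwdG a (j + 1) < pwdG a (j + 1 - 1) + K) := by
        by_cases hjn : j + 1 < N
        · right; right
          have h1 : j + 1 - 1 = j := by ring
          rw [h1]
          intro hcc
          exact hj3 ⟨hjn, hcc⟩
        · left; omega
      have hrec := ih (j + 1) (if PySem.Int.mod (j - i + 1) 2 = 1 then t - pwdG a i else t)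
        (by omega) (by omega) (by omega) hbound
      rw [pwdLoop, dif_pos hiN, ← hj, hrec]
      have hrun := pwdF_run a K (j - i).toNat i j (by omega) h0 hji
        (by
          rcases hb with h | h | h
          · omega
          · left; exact h
          · right; exact h)
        hj2
      have h1 : j + 1 - 1 = j := by ring
      rw [h1]
      rw [hrun]
      rw [pwdSumFrom_split a N (j + 1) i (by omega) (by omega)]
      split_ifs with hm
      · ring
      · ring
    · have hi : i = N := by omega
      subst hi
      rw [pwdLoop, dif_neg (lt_irrefl _), pwdSumFrom_nil a _ _ le_rfl]
      ring

-- ===== VERDICT (by name: the statements are the Claim_ definitions above) =====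
theorem pairsWithDifference_spec : Claim_equal_pairsWithDifference := by
  intro arr N K _ hP
  obtain ⟨h1, h2⟩ := hP
  set a := PySem.List.sorted arr (fun x => x) false with ha
  have hlen : N ≤ a.length := by
    rw [ha, PySem.List.length_sorted arr _ false]; exact h2
  show pwdFinish a N _ = _
  rw [pwd_top a K N h1 hlen,
    pwd_loopF a K N N.toNat 0 (PySem.List.slice a none (some N)).sum (by omega) le_rfl
      (by omega) (by omega),
    pwd_sum_slice a N h1 hlen, pwdSumFrom_cons a N 0 (by omega)]
  have h01 : (0:Int) + 1 = 1 := by ring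
  rw [h01, pwdF_neg a K (0 - 1) (by omega)]
  show _ = pwdPairT a K (N - 1) 0
  rw [pwdPairT_eq a K (N - 1) 0]
  ring
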